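-- pv_equiv track=rewrite | github.com/ramonserranoprofile/coder_byte | coderbyte/medium/swap_2.py | SwapII
-- ===== SOURCE A (Python) =====
-- def SwapII(str):
--     result = [i.lower() if i.isupper() else i.upper() for i in str]
--     first = -1
--     for i in range(len(result)):
--         if result[i].isdigit():
--             if first == -1:
--                 first = i
--             else:
--                 result[first], result[i] = result[i], result[first]
--                 first = -1
--     return "".join(result)
-- ===== SOURCE B (Python) =====
-- def SwapII(str):
--     result = [c.lower() if c.isupper() else c.upper() for c in str]
--     idx = [i for i in range(len(result)) if result[i].isdigit()]
--     k = 0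
--     while k + 1 < len(idx):
--         i, j = idx[k], idx[k + 1]
--         result[i], result[j] = result[j], result[i]
--         k += 2
--     return "".join(result)
-- ===== Notes on version B (the rewrite author's own statement) =====
-- stated objective: simpler
-- what changed: A's single-pass flip-flop with the sentinel first=-1 is replaced by a two-stage decomposition: collect all digit indices once, then swap consecutive pairs of them, leaving a lone trailing digit untouched.
import Mathlib
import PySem

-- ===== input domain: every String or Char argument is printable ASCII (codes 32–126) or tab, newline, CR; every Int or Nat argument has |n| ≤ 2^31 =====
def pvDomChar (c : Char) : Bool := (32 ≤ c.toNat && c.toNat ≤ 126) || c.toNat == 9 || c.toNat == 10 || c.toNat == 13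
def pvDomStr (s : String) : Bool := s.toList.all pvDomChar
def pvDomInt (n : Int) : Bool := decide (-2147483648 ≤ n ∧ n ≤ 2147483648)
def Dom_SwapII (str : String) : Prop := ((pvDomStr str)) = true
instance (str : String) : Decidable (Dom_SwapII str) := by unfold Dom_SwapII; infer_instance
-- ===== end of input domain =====

-- B replaces A's one-pass flip-flop sentinel (first = -1) by a plain decomposition:
-- collect the digit indices once, then swap consecutive pairs of them (objective: simpler).

-- ===== PORT A =====
-- shared case-swap comprehension body: i.lower() if i.isupper() else i.upper()
def pvCaseSwap (c : Char) : Char :=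
  if PySem.Chars.isupper c then PySem.Chars.lowerChar c else PySem.Chars.upperChar c

-- loop body of A; Python's int sentinel first = -1 is Option Nat's none
-- (result[i] is always in range in A; getD ' ' is the in-range access)
def pvStepA (st : List Char × Option Nat) (i : Nat) : List Char × Option Nat :=
  let result := st.1
  if PySem.Chars.isdigit (result.getD i ' ') then
    match st.2 with
    | none => (result, some i)
    | some first =>
        let a := result.getD i ' '
        let b := result.getD first ' '
        ((result.set first a).set i b, none)
  else st

def SwapII (str : String) : String :=
  let result := str.toList.map pvCaseSwap
  let st := (List.range result.length).foldl pvStepA (result, none)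
  String.ofList st.1

-- ===== PORT B =====
-- the while-loop of Source B: consume idx two indices at a time, swapping each pair
def pvPairSwap : List Nat → List Char → List Char
  | i :: j :: rest, res =>
      let a := res.getD j ' '
      let b := res.getD i ' '
      pvPairSwap rest ((res.set i a).set j b)
  | _, res => res

def SwapII_alt (str : String) : String :=
  let result := str.toList.map pvCaseSwap
  let idx := (List.range result.length).filter (fun i => PySem.Chars.isdigit (result.getD i ' '))
  String.ofList (pvPairSwap idx result)

-- ===== PRECONDITION & SPEC =====
def Spec_SwapII (str : String) (out : String) : Prop := out = SwapII_alt str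
instance (str : String) (out : String) : Decidable (Spec_SwapII str out) := by unfold Spec_SwapII; infer_instance

-- ===== CLAIM (what is proved, stated in full; the proofs are below) =====
def Claim_equal_SwapII : Prop := ∀ (str : String), Dom_SwapII str → Spec_SwapII str (SwapII str)

-- ===== LEMMAS AND PROOFS =====

-- swapping the values at two digit positions leaves the digit mask unchanged
lemma pvDigitMask_swap (res : List Char) (f i k : Nat)
    (hf : PySem.Chars.isdigit (res.getD f ' ') = true)
    (hi : PySem.Chars.isdigit (res.getD i ' ') = true) :
    PySem.Chars.isdigit (((res.set f (res.getD i ' ')).set i (res.getD f ' ')).getD k ' ')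
      = PySem.Chars.isdigit (res.getD k ' ') := by
  have hfl : f < res.length := by
    by_contra h
    rw [List.getD_eq_default _ _ (Nat.le_of_not_lt h)] at hf
    exact absurd hf (by decide)
  have hil : i < res.length := by
    by_contra h
    rw [List.getD_eq_default _ _ (Nat.le_of_not_lt h)] at hi
    exact absurd hi (by decide)
  by_cases hki : k = i
  · subst hki
    rw [List.getD_eq_getElem?_getD, List.getElem?_set_self (by simpa using hil)]
    simp [← List.getD_eq_getElem?_getD, hf, hi]
  · by_cases hkf : k = f
    · subst hkf
      rw [List.getD_eq_getElem?_getD, List.getElem?_set_ne (fun h => hki h.symm),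
        List.getElem?_set_self hfl]
      simp [← List.getD_eq_getElem?_getD, hf, hi]
    · rw [List.getD_eq_getElem?_getD, List.getElem?_set_ne (fun h => hki h.symm),
        List.getElem?_set_ne (fun h => hkf h.symm), ← List.getD_eq_getElem?_getD]

-- A's scan with pending state f? equals B's pairwise pass over f? followed by the digit indices of L
lemma pvLoopA (L : List Nat) : ∀ (res : List Char) (f? : Option Nat),
    (∀ f ∈ f?, PySem.Chars.isdigit (res.getD f ' ') = true) →
    (L.foldl pvStepA (res, f?)).1 =
      pvPairSwap (f?.toList ++ L.filter (fun i => PySem.Chars.isdigit (res.getD i ' '))) res := by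
  induction L with
  | nil =>
    intro res f? _
    cases f? <;> simp [pvPairSwap]
  | cons i L' ih =>
    intro res f? hf
    by_cases hd : PySem.Chars.isdigit (res.getD i ' ') = true
    · cases f? with
      | none =>
        simp only [List.foldl_cons, pvStepA, hd, if_pos]
        rw [ih res (some i) (by simpa using hd)]
        simp only [List.filter_cons, hd, if_true, Option.toList_some, Option.toList_none,
          List.nil_append, List.cons_append]
      | some f =>
        have hfd : PySem.Chars.isdigit (res.getD f ' ') = true := hf f rfl
        simp only [List.foldl_cons, pvStepA, hd, if_pos]
        rw [ih ((res.set f (res.getD i ' ')).set i (res.getD f ' ')) none (by simp)]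
        simp only [List.filter_cons, hd, if_true, Option.toList_some, Option.toList_none,
          List.nil_append, List.cons_append]
        rw [pvPairSwap]
        congr 1
        apply List.filter_congr
        intro k _
        exact pvDigitMask_swap res f i k hfd hd
    · have hd2 : PySem.Chars.isdigit (res.getD i ' ') = false := by simpa using hd
      simp only [List.foldl_cons, pvStepA, hd2, Bool.false_eq_true, if_false]
      rw [ih res f? hf]
      simp only [List.filter_cons, hd2, Bool.false_eq_true, if_false]

-- ===== VERDICT (by name: the statement is the Claim_ definition above) =====
theorem SwapII_spec : Claim_equal_SwapII := by
  intro str _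
  unfold Spec_SwapII SwapII SwapII_alt
  exact congrArg String.ofList (pvLoopA (List.range (str.toList.map pvCaseSwap).length)
    (str.toList.map pvCaseSwap) none (by simp))
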